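-- pv_equiv track=rewrite | github.com/annnnnnnnnnie/leetcode_practices | Practices/knapsack_complete.py | preprocess_item_list
-- ===== SOURCE A (Python) =====
-- def preprocess_item_list(items, knapsack_size):
--     """
--     Throws away items with C > knapsack_size.
--     Throws away items i when there exists item j such that: Vi <= Vj and Ci == Cj
--     Note: Does not throw away i when Ci > Cj and Vi <= Vj due to bad implementation
--     :param items: [(cost, value)]
--     :param knapsack_size: int
--     :return: preprocessed item_list
--     """
--     result = {}  # key: cost, value: item value
--     for item in items:
--         cost = item[0]
--         value = item[1]
--         if cost > knapsack_size:
--             continue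
--         elif cost in result:
--             old_value = result[cost]
--             if value > old_value:
--                 result[cost] = value
--         else:
--             result[cost] = value
--     return list(result.items())
-- ===== SOURCE B (Python) =====
-- def preprocess_item_list(items, knapsack_size):
--     # Group-extraction algorithm: filter admissible items once, then repeatedly
--     # take the first remaining cost, emit its maximum value, and drop its group.
--     rest = [item for item in items if item[0] <= knapsack_size]
--     result = []
--     while rest:
--         cost = rest[0][0]
--         result.append((cost, max(v for c, v in rest if c == cost)))
--         rest = [item for item in rest[1:] if item[0] != cost]
--     return result
-- ===== Notes on version B (the rewrite author's own statement) =====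
-- stated objective: alternative
-- what changed: A folds every item into an insertion-ordered dict with compare-and-overwrite; B uses no dict at all: it filters admissible items once and then repeatedly extracts the whole group of the first remaining cost (emitting its max value) from a shrinking work list.
import Mathlib
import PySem

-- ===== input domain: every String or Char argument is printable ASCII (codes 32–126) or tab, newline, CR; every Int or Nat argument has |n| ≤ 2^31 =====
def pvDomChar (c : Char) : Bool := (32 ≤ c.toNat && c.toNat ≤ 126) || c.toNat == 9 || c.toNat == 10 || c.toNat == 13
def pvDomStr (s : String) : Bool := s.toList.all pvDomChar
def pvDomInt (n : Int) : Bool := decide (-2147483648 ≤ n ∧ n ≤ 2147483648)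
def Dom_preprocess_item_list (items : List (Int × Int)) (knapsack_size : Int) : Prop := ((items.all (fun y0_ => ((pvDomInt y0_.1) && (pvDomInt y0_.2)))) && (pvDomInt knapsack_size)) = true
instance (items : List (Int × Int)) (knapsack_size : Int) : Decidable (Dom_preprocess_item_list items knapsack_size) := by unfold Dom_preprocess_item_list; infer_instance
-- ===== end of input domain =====

-- B replaces A's incremental dict by a dict-free group-extraction algorithm: filter
-- the admissible items once, then repeatedly pop the first remaining cost's whole
-- group, emitting its maximum value; objective: alternative (not faster).

-- ===== PORT A =====
def preprocess_item_list (items : List (Int × Int)) (knapsack_size : Int) : List (Int × Int) :=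
  (items.foldl (fun (result : PySem.Dict Int Int) item =>
      let cost := item.1
      let value := item.2
      if cost > knapsack_size then result
      else if result.contains cost then
        let old_value := result.getD cost 0   -- result[cost]; cost is present, so getD is exact
        if value > old_value then result.insert cost value else result
      else result.insert cost value)
    PySem.Dict.empty).items

-- ===== PORT B =====
-- max(v for c, v in rest if c == cost): left fold of 'max' over the matching values
def pvGroupMax (c : Int) : List (Int × Int) → Int → Int
  | [], acc => acc
  | q :: t, acc => pvGroupMax c t (if q.1 = c then max acc q.2 else acc)

-- the 'while rest:' loop of B
def pvGo : List (Int × Int) → List (Int × Int)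
  | [] => []
  | p :: t => (p.1, pvGroupMax p.1 t p.2) :: pvGo (t.filter (fun q => decide (q.1 ≠ p.1)))
termination_by l => l.length
decreasing_by
  simp only [List.length_unattach, List.length_cons]
  exact Nat.lt_succ_of_le (le_trans (List.length_filter_le _ _) (by simp))

def preprocess_item_list_alt (items : List (Int × Int)) (knapsack_size : Int) : List (Int × Int) :=
  pvGo (items.filter (fun item => decide (item.1 ≤ knapsack_size)))

-- ===== PRECONDITION & SPEC =====
def Spec_preprocess_item_list (items : List (Int × Int)) (knapsack_size : Int) (out : List (Int × Int)) : Prop := out = preprocess_item_list_alt items knapsack_size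
instance (items : List (Int × Int)) (knapsack_size : Int) (out : List (Int × Int)) : Decidable (Spec_preprocess_item_list items knapsack_size out) := by unfold Spec_preprocess_item_list; infer_instance

-- ===== CLAIM (what is proved, stated in full; the proofs are below) =====
def Claim_equal_preprocess_item_list : Prop := ∀ (items : List (Int × Int)) (knapsack_size : Int), Dom_preprocess_item_list items knapsack_size → Spec_preprocess_item_list items knapsack_size (preprocess_item_list items knapsack_size)

-- ===== LEMMAS AND PROOFS =====

lemma pvGo_nil : pvGo [] = [] := by simp [pvGo]

lemma pvGo_cons (p : Int × Int) (t : List (Int × Int)) :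
    pvGo (p :: t) = (p.1, pvGroupMax p.1 t p.2) :: pvGo (t.filter (fun q => decide (q.1 ≠ p.1))) := by
  conv_lhs => unfold pvGo

def bestOf (c : Int) (l : List (Int × Int)) (v0 : Int) : Int :=
  l.foldl (fun acc p => if p.1 = c ∧ p.2 > acc then p.2 else acc) v0

def bestOpt (c : Int) (l : List (Int × Int)) (o : Option Int) : Option Int :=
  l.foldl (fun o p => if p.1 = c then some (match o with | none => p.2 | some w => max w p.2) else o) o

def restSpec (k : Int) : List (Int × Int) → List Int → List (Int × Int)
  | [], _ => []
  | p :: t, s =>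
    if p.1 ≤ k ∧ p.1 ∉ s then (p.1, bestOf p.1 t p.2) :: restSpec k t (s ++ [p.1])
    else restSpec k t s

lemma bestOf_cons (c : Int) (q : Int × Int) (t : List (Int × Int)) (v : Int) :
    bestOf c (q :: t) v = bestOf c t (if q.1 = c ∧ q.2 > v then q.2 else v) := rfl

lemma bestOf_cons_ne (c : Int) (q : Int × Int) (t : List (Int × Int)) (v : Int)
    (h : q.1 ≠ c) : bestOf c (q :: t) v = bestOf c t v := by
  rw [bestOf_cons, if_neg (fun hh => h hh.1)]

lemma restSpec_cons (k : Int) (p : Int × Int) (t : List (Int × Int)) (s : List Int) :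
    restSpec k (p :: t) s = if p.1 ≤ k ∧ p.1 ∉ s then (p.1, bestOf p.1 t p.2) :: restSpec k t (s ++ [p.1]) else restSpec k t s := rfl

lemma A_char (k : Int) : ∀ (t : List (Int × Int)) (d : PySem.Dict Int Int),
    d.keys.Nodup → (∀ c ∈ d.keys, c ≤ k) →
    (t.foldl (fun result item =>
        if item.1 > k then result
        else if result.contains item.1 then
          if item.2 > result.getD item.1 0 then result.insert item.1 item.2 else result
        else result.insert item.1 item.2) d).items
      = d.items.map (fun p => (p.1, bestOf p.1 t p.2)) ++ restSpec k t d.keys := by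
  intro t
  induction t with
  | nil =>
    intro d _ _
    simp [restSpec, bestOf]
  | cons q t ih =>
    intro d hnd hk
    have hkeys : ∀ p ∈ d.items, p.1 ∈ d.keys := by
      intro p hp
      simp only [PySem.Dict.keys]
      exact List.mem_map_of_mem hp
    by_cases hq : q.1 > k
    · -- skipped item: cost too large
      have hne : ∀ p ∈ d.items, (p.1, bestOf p.1 (q :: t) p.2) = (p.1, bestOf p.1 t p.2) := by
        intro p hp
        have hn : q.1 ≠ p.1 := by have := hk _ (hkeys p hp); omega
        rw [bestOf_cons_ne _ _ _ _ hn]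
      have hrs : restSpec k (q :: t) d.keys = restSpec k t d.keys := by
        rw [restSpec_cons, if_neg (fun h => absurd h.1 (by omega))]
      rw [List.foldl_cons, if_pos hq, ih d hnd hk, hrs, List.map_congr_left hne]
    · rw [List.foldl_cons, if_neg hq]
      have hqk : q.1 ≤ k := by omega
      cases hget : d.get? q.1 with
      | some w =>
        have hcon : d.contains q.1 = true := by
          rw [PySem.Dict.contains_eq_isSome_get?, hget]; rfl
        have hgd : d.getD q.1 0 = w := by
          rw [PySem.Dict.getD_eq_get?_getD, hget]; rfl
        have hmem : q.1 ∈ d.keys := (PySem.Dict.contains_iff_mem_keys d q.1).mp hcon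
        have hrs : restSpec k (q :: t) d.keys = restSpec k t d.keys := by
          rw [restSpec_cons, if_neg (fun h => h.2 hmem)]
        have hval : ∀ p ∈ d.items, p.1 = q.1 → p.2 = w := by
          intro p hp hpq
          have hp' : (p.1, p.2) ∈ d.items := by simpa using hp
          have h2 := PySem.Dict.get?_of_mem_items d hp' hnd
          rw [hpq, hget] at h2
          exact (Option.some_inj.mp h2).symm
        rw [if_pos hcon, hgd]
        by_cases hv : q.2 > w
        · -- strictly larger value: overwrite in place
          rw [if_pos hv,
            ih (d.insert q.1 q.2) (PySem.Dict.nodup_keys_insert d q.1 q.2 hnd)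
              (by intro c hc
                  rcases (PySem.Dict.mem_keys_insert d q.1 c q.2).mp hc with h | h
                  · omega
                  · exact hk c h),
            PySem.Dict.items_insert_of_contains d q.2 hcon,
            PySem.Dict.keys_insert_of_contains d q.2 hcon, hrs, List.map_map,
            List.map_congr_left]
          intro p hp
          by_cases hpq : p.1 = q.1
          · have hw := hval p hp hpq
            simp only [Function.comp, hpq, beq_self_eq_true, if_true, hw]
            rw [bestOf_cons, if_pos ⟨rfl, by omega⟩]
          · simp only [Function.comp, beq_iff_eq, if_neg hpq]
            rw [bestOf_cons_ne _ _ _ _ (fun h => hpq h.symm)]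
        · rw [if_neg hv, ih d hnd hk, hrs, List.map_congr_left]
          intro p hp
          by_cases hpq : p.1 = q.1
          · have hw := hval p hp hpq
            rw [bestOf_cons, if_neg (fun h => hv (by omega)), ]
          · rw [bestOf_cons_ne _ _ _ _ (fun h => hpq h.symm)]
      | none =>
        have hcon : d.contains q.1 = false := by
          rw [PySem.Dict.contains_eq_isSome_get?, hget]; rfl
        have hnmem : q.1 ∉ d.keys := by
          intro h
          have := (PySem.Dict.contains_iff_mem_keys d q.1).mpr h
          rw [hcon] at this
          cases this
        rw [if_neg (by rw [hcon]; exact Bool.false_ne_true),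
          ih (d.insert q.1 q.2) (PySem.Dict.nodup_keys_insert d q.1 q.2 hnd)
            (by intro c hc
                rcases (PySem.Dict.mem_keys_insert d q.1 c q.2).mp hc with h | h
                · omega
                · exact hk c h),
          PySem.Dict.items_insert_of_not_contains d q.2 hcon,
          PySem.Dict.keys_insert_of_not_contains d q.2 hcon,
          List.map_append]
        have hrs : restSpec k (q :: t) d.keys
            = (q.1, bestOf q.1 t q.2) :: restSpec k t (d.keys ++ [q.1]) := by
          rw [restSpec_cons, if_pos ⟨hqk, hnmem⟩]
        rw [hrs, List.map_congr_left (l := d.items)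
          (g := fun p => (p.1, bestOf p.1 (q :: t) p.2))]
        · simp [bestOf_cons]
        · intro p hp
          have hn : q.1 ≠ p.1 := fun h => hnmem (h ▸ hkeys p hp)
          rw [bestOf_cons_ne _ _ _ _ hn]

-- A's running max (strict-compare overwrite) is B's 'max' fold
lemma bestOf_eq_groupMax (c : Int) : ∀ (l : List (Int × Int)) (v : Int),
    bestOf c l v = pvGroupMax c l v := by
  intro l
  induction l with
  | nil => intro v; rfl
  | cons q t ih =>
    intro v
    rw [bestOf_cons, pvGroupMax, ih]
    congr 1
    by_cases hq : q.1 = c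
    · by_cases hv : q.2 > v
      · rw [if_pos ⟨hq, hv⟩, if_pos hq]; omega
      · rw [if_neg (fun h => hv h.2), if_pos hq]; omega
    · rw [if_neg (fun h => hq h.1), if_neg hq]

-- filtering away non-matching items does not change the group max
lemma groupMax_filter (c : Int) (P : Int × Int → Bool)
    (hP : ∀ q : Int × Int, q.1 = c → P q = true) :
    ∀ (l : List (Int × Int)) (v : Int), pvGroupMax c (l.filter P) v = pvGroupMax c l v := by
  intro l
  induction l with
  | nil => intro v; rfl
  | cons q t ih =>
    intro v
    by_cases hq : P q
    · rw [List.filter_cons_of_pos hq, pvGroupMax, pvGroupMax, ih]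
    · have hqc : q.1 ≠ c := fun h => hq (hP q h)
      rw [List.filter_cons_of_neg hq, pvGroupMax, if_neg hqc, ih]

-- restSpec over the not-yet-seen admissible items is exactly B's loop
lemma restSpec_eq_go (k : Int) : ∀ (t : List (Int × Int)) (s : List Int),
    restSpec k t s = pvGo (t.filter (fun q => decide (q.1 ≤ k) && decide (q.1 ∉ s))) := by
  intro t
  induction t with
  | nil => intro s; simp [restSpec, pvGo_nil]
  | cons p t ih =>
    intro s
    rw [restSpec_cons]
    by_cases hc : p.1 ≤ k ∧ p.1 ∉ s
    · rw [if_pos hc, List.filter_cons_of_pos (by simp [hc.1, hc.2]), pvGo_cons]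
      have h1 : pvGroupMax p.1 (t.filter (fun q => decide (q.1 ≤ k) && decide (q.1 ∉ s))) p.2
          = pvGroupMax p.1 t p.2 := by
        apply groupMax_filter
        intro q hq
        simp only [Bool.and_eq_true, decide_eq_true_eq]
        exact ⟨hq ▸ hc.1, hq ▸ hc.2⟩
      have h2 : (t.filter (fun q => decide (q.1 ≤ k) && decide (q.1 ∉ s))).filter
            (fun q => decide (q.1 ≠ p.1))
          = t.filter (fun q => decide (q.1 ≤ k) && decide (q.1 ∉ s ++ [p.1])) := by
        rw [List.filter_filter]
        apply List.filter_congr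
        intro q _
        by_cases hqp : q.1 = p.1
        · simp [hqp]
        · simp [hqp, List.mem_append]
      rw [h1, h2, bestOf_eq_groupMax, ih]
    · have hdrop : (decide (p.1 ≤ k) && decide (p.1 ∉ s)) = false := by
        by_cases hk : p.1 ≤ k
        · have : p.1 ∈ s := by by_contra hn; exact hc ⟨hk, hn⟩
          simp [this]
        · simp [hk]
      rw [if_neg hc, List.filter_cons_of_neg (by rw [hdrop]; exact Bool.false_ne_true), ih]

-- ===== VERDICT (by name: the statement is the Claim_ definition above) =====
theorem preprocess_item_list_spec : Claim_equal_preprocess_item_list := by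
  intro items k _
  unfold Spec_preprocess_item_list
  have hA : preprocess_item_list items k = restSpec k items [] :=
    A_char k items PySem.Dict.empty (by simp [pysem]) (by intro c hc; simp [pysem] at hc)
  rw [hA, restSpec_eq_go k items []]
  unfold preprocess_item_list_alt
  congr 1
  apply List.filter_congr
  intro q _
  simp
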